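-- pv_equiv track=rewrite | github.com/xiw54/chatbot-play | utils.py | remove_short_long_sent
-- ===== SOURCE A (Python) =====
-- def remove_short_long_sent(questions, answers, min_line_length = 2, max_line_length = 20):
--
--     # Filter out the questions that are too short/long
--     short_questions_temp = []
--     short_answers_temp = []
--
--     i = 0
--     for question in questions:
--         if len(question.split()) >= min_line_length and len(question.split()) <= max_line_length:
--             short_questions_temp.append(question)
--             short_answers_temp.append(answers[i])
--         i += 1
--
--     # Filter out the answers that are too short/long
--     short_questions = []
--     short_answers = []
--
--     i = 0
--     for answer in short_answers_temp:
--         if len(answer.split()) >= min_line_length and len(answer.split()) <= max_line_length: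
--             short_answers.append(answer)
--             short_questions.append(short_questions_temp[i])
--         i += 1
--     return short_questions, short_answers
-- ===== SOURCE B (Python) =====
-- def remove_short_long_sent(questions, answers, min_line_length = 2, max_line_length = 20):
--     # Single fused pass: test the question first, then its answer, append both at once.
--     short_questions = []
--     short_answers = []
--     for i, question in enumerate(questions):
--         if min_line_length <= len(question.split()) <= max_line_length:
--             answer = answers[i]
--             if min_line_length <= len(answer.split()) <= max_line_length:
--                 short_questions.append(question)
--                 short_answers.append(answer)
--     return short_questions, short_answers
-- ===== Notes on version B (the rewrite author's own statement) =====
-- stated objective: simpler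
-- what changed: Replaced the two staged filtering passes with their intermediate temp lists by one fused pass that tests each question and, only if it qualifies, its answer, appending both at once.
import Mathlib
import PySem

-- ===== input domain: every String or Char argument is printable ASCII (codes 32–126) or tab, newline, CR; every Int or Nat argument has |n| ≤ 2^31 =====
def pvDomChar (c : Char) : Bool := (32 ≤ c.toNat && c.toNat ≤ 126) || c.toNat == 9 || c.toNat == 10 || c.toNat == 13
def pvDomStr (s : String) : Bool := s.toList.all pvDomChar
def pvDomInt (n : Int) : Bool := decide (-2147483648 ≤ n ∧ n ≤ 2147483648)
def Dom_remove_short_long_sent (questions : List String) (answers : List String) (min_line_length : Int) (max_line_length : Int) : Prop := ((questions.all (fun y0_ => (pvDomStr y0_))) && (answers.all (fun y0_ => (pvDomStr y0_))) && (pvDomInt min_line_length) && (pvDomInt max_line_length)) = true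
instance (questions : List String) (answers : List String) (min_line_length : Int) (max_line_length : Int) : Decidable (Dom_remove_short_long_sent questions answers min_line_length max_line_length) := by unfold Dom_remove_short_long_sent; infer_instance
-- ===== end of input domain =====

-- B fuses A's two staged passes (with their intermediate temp lists) into one pass; simpler, same cost.

-- word count of s, len(s.split())
def pvWC (s : String) : Int := ((PySem.Str.split₀ s).length : Int)

-- ===== PORT A =====
def remove_short_long_sent (questions : List String) (answers : List String) (min_line_length : Int) (max_line_length : Int) : List String × List String :=
  -- pass 1: filter questions, collecting answers[i] alongside (pyGetD exact under Pre_)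
  let p1 := questions.foldl (fun st question =>
    if min_line_length ≤ pvWC question ∧ pvWC question ≤ max_line_length then
      (st.1 + 1, st.2.1 ++ [question], st.2.2 ++ [PySem.List.pyGetD answers st.1 ""])
    else (st.1 + 1, st.2.1, st.2.2))
    ((0 : Int), ([] : List String), ([] : List String))
  -- pass 2: filter the collected answers, indexing the temp question list by a counter
  let p2 := p1.2.2.foldl (fun st answer =>
    if min_line_length ≤ pvWC answer ∧ pvWC answer ≤ max_line_length then
      (st.1 + 1, st.2.1 ++ [PySem.List.pyGetD p1.2.1 st.1 ""], st.2.2 ++ [answer])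
    else (st.1 + 1, st.2.1, st.2.2))
    ((0 : Int), ([] : List String), ([] : List String))
  (p2.2.1, p2.2.2)

-- ===== PORT B =====
def remove_short_long_sent_alt (questions : List String) (answers : List String) (min_line_length : Int) (max_line_length : Int) : List String × List String :=
  (PySem.List.enumerate questions).foldl (fun st iq =>
    if min_line_length ≤ pvWC iq.2 ∧ pvWC iq.2 ≤ max_line_length then
      let answer := PySem.List.pyGetD answers iq.1 ""
      if min_line_length ≤ pvWC answer ∧ pvWC answer ≤ max_line_length then
        (st.1 ++ [iq.2], st.2 ++ [answer])
      else st
    else st)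
    (([] : List String), ([] : List String))

-- ===== PRECONDITION & SPEC =====
-- Pre_ excludes exactly the inputs where Python raises IndexError: a question whose
-- word count is within bounds sitting at an index past the end of answers.
def Pre_remove_short_long_sent (questions : List String) (answers : List String) (min_line_length : Int) (max_line_length : Int) : Prop :=
  ∀ i : Nat, i < questions.length →
    (min_line_length ≤ pvWC questions[i]! ∧ pvWC questions[i]! ≤ max_line_length) →
    i < answers.length
instance (questions : List String) (answers : List String) (min_line_length : Int) (max_line_length : Int) : Decidable (Pre_remove_short_long_sent questions answers min_line_length max_line_length) := by unfold Pre_remove_short_long_sent; infer_instance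

def pvWitness_remove_short_long_sent : List String × List String × Int × Int :=
  (["a b", "x"], ["c d e"], 2, 20)

def Spec_remove_short_long_sent (questions : List String) (answers : List String) (min_line_length : Int) (max_line_length : Int) (out : List String × List String) : Prop := out = remove_short_long_sent_alt questions answers min_line_length max_line_length
instance (questions : List String) (answers : List String) (min_line_length : Int) (max_line_length : Int) (out : List String × List String) : Decidable (Spec_remove_short_long_sent questions answers min_line_length max_line_length out) := by unfold Spec_remove_short_long_sent; infer_instance

-- ===== CLAIM (what is proved, stated in full; the proofs are below) =====
def Claim_equal_remove_short_long_sent : Prop := ∀ (questions : List String) (answers : List String) (min_line_length : Int) (max_line_length : Int), Dom_remove_short_long_sent questions answers min_line_length max_line_length → Pre_remove_short_long_sent questions answers min_line_length max_line_length → Spec_remove_short_long_sent questions answers min_line_length max_line_length (remove_short_long_sent questions answers min_line_length max_line_length)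

-- ===== LEMMAS AND PROOFS =====

-- the (question, answers[i]) pairs selected by A's first pass, starting at index i
def pvSel (answers : List String) (mn mx : Int) : List String → Int → List (String × String)
  | [], _ => []
  | q :: r, i =>
    if mn ≤ pvWC q ∧ pvWC q ≤ mx then
      (q, PySem.List.pyGetD answers i "") :: pvSel answers mn mx r (i + 1)
    else pvSel answers mn mx r (i + 1)

-- A's second pass as a zip-filter on the selected pairs
def pvFF (mn mx : Int) : List (String × String) → List String × List String
  | [] => ([], [])
  | (q, a) :: r =>
    if mn ≤ pvWC a ∧ pvWC a ≤ mx then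
      (q :: (pvFF mn mx r).1, a :: (pvFF mn mx r).2)
    else pvFF mn mx r

-- B as a structural recursion with index
def pvG (answers : List String) (mn mx : Int) : List String → Int → List String × List String
  | [], _ => ([], [])
  | q :: r, i =>
    if mn ≤ pvWC q ∧ pvWC q ≤ mx then
      let a := PySem.List.pyGetD answers i ""
      if mn ≤ pvWC a ∧ pvWC a ≤ mx then
        (q :: (pvG answers mn mx r (i + 1)).1, a :: (pvG answers mn mx r (i + 1)).2)
      else pvG answers mn mx r (i + 1)
    else pvG answers mn mx r (i + 1)

theorem pass1_eq (answers : List String) (mn mx : Int) :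
    ∀ (qs : List String) (i : Int) (t1 t2 : List String),
      qs.foldl (fun st question =>
        if mn ≤ pvWC question ∧ pvWC question ≤ mx then
          (st.1 + 1, st.2.1 ++ [question], st.2.2 ++ [PySem.List.pyGetD answers st.1 ""])
        else (st.1 + 1, st.2.1, st.2.2)) (i, t1, t2)
      = (i + qs.length, t1 ++ (pvSel answers mn mx qs i).map Prod.fst,
          t2 ++ (pvSel answers mn mx qs i).map Prod.snd) := by
  intro qs
  induction qs with
  | nil => intro i t1 t2; simp [pvSel]
  | cons q r ih =>
    intro i t1 t2
    simp only [List.foldl_cons, pvSel]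
    split_ifs with h
    · rw [ih]; simp [List.append_assoc]; omega
    · rw [ih]; simp; omega

theorem pass2_eq (mn mx : Int) :
    ∀ (ps pre : List (String × String)) (s1 s2 : List String),
      (ps.map Prod.snd).foldl (fun st answer =>
        if mn ≤ pvWC answer ∧ pvWC answer ≤ mx then
          (st.1 + 1, st.2.1 ++ [PySem.List.pyGetD ((pre ++ ps).map Prod.fst) st.1 ""], st.2.2 ++ [answer])
        else (st.1 + 1, st.2.1, st.2.2)) ((pre.length : Int), s1, s2)
      = ((pre.length : Int) + ps.length, s1 ++ (pvFF mn mx ps).1, s2 ++ (pvFF mn mx ps).2) := by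
  intro ps
  induction ps with
  | nil => intro pre s1 s2; simp [pvFF]
  | cons p r ih =>
    intro pre s1 s2
    obtain ⟨q, a⟩ := p
    simp only [List.map_cons, List.foldl_cons, pvFF]
    have hget : PySem.List.pyGetD ((pre ++ (q, a) :: r).map Prod.fst) (pre.length : Int) "" = q := by
      have : (pre ++ (q, a) :: r).map Prod.fst = pre.map Prod.fst ++ q :: r.map Prod.fst := by simp
      rw [this, PySem.List.pyGetD_natCast]
      simp [List.getD]
    have hlen : ((pre ++ [(q, a)]).length : Int) = (pre.length : Int) + 1 := by simp
    have hrec := ih (pre ++ [(q, a)])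
    simp only [List.append_assoc, List.singleton_append, hlen] at hrec
    split_ifs with h
    · rw [hget, hrec]; simp [List.append_assoc]; omega
    · rw [hrec]; simp; omega

theorem fused_eq (answers : List String) (mn mx : Int) :
    ∀ (qs : List String) (i : Int) (s1 s2 : List String),
      (PySem.List.enumerate qs i).foldl (fun st iq =>
        if mn ≤ pvWC iq.2 ∧ pvWC iq.2 ≤ mx then
          let answer := PySem.List.pyGetD answers iq.1 ""
          if mn ≤ pvWC answer ∧ pvWC answer ≤ mx then
            (st.1 ++ [iq.2], st.2 ++ [answer])
          else st
        else st) (s1, s2)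
      = (s1 ++ (pvG answers mn mx qs i).1, s2 ++ (pvG answers mn mx qs i).2) := by
  intro qs
  induction qs with
  | nil => intro i s1 s2; simp [PySem.List.enumerate_nil, pvG]
  | cons q r ih =>
    intro i s1 s2
    rw [PySem.List.enumerate_cons]
    simp only [List.foldl_cons, pvG]
    split_ifs with h1 h2 <;> rw [ih] <;> simp [List.append_assoc]

theorem g_eq_ff_sel (answers : List String) (mn mx : Int) :
    ∀ (qs : List String) (i : Int),
      pvG answers mn mx qs i = pvFF mn mx (pvSel answers mn mx qs i) := by
  intro qs
  induction qs with
  | nil => intro i; simp [pvG, pvSel, pvFF]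
  | cons q r ih =>
    intro i
    simp only [pvG, pvSel]
    split_ifs with h1 h2
    · rw [ih]; simp [pvFF, h2]
    · rw [ih]; simp [pvFF, h2]
    · exact ih (i + 1)

-- ===== VERDICT (by name: the statement is the Claim_ definition above) =====
theorem remove_short_long_sent_spec : Claim_equal_remove_short_long_sent := by
  intro questions answers mn mx _ _
  unfold Spec_remove_short_long_sent remove_short_long_sent remove_short_long_sent_alt
  rw [fused_eq, g_eq_ff_sel]
  have h1 := pass1_eq answers mn mx questions 0 [] []
  simp only [List.nil_append, zero_add] at h1
  rw [h1]
  dsimp only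
  have h2 := pass2_eq mn mx (pvSel answers mn mx questions 0) [] [] []
  simp only [List.nil_append, List.length_nil, Nat.cast_zero, zero_add] at h2
  rw [h2]
  simp
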